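-- pv_equiv track=rewrite | github.com/cry999/AtCoder | grand/031/C.py | diff_idx
-- ===== SOURCE A (Python) =====
-- def diff_idx(a: int, b: int)->int:
--     '''a と b のビット列を比較してビットの状態が異なる最小の
--     インデックスを返します。ここで、インデックスは 2^i の i
--     に対応する。
--     :param a: number 1
--     :param b: number 2
--     :return: index
--     '''
--     if a == b:
--         return -1
--     idx = 0
--     while a > 0 or b > 0:
--         if a & 1 != b & 1:
--             break
--         idx += 1
--         a, b = a >> 1, b >> 1
--     return idx
-- ===== SOURCE B (Python) =====
-- def diff_idx(a: int, b: int) -> int: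
--     '''Index of the lowest bit where a and b differ (-1 if a == b),
--     as a single closed-form bit computation: the lowest set bit of
--     a ^ b is isolated with x & -x and its index read off bit_length.'''
--     x = a ^ b
--     if x == 0:
--         return -1
--     return (x & -x).bit_length() - 1
-- ===== Notes on version B (the rewrite author's own statement) =====
-- stated objective: simpler
-- what changed: A's per-bit loop (shift both numbers, compare parities under an 'a > 0 or b > 0' guard) is replaced by one closed-form bit computation: x = a ^ b, isolate the lowest set bit with x & -x and read its index off bit_length, with no loop at all.
-- intended difference: On pairs a != b whose bits agree through max(bit_length(max(a,0)), bit_length(max(b,0))) (possible only when a or b is negative, e.g. (-4,-2)), A's guard 'a > 0 or b > 0' stops the scan early and returns the stale counter (0 for (-4,-2)) while B returns the true lowest differing-bit index (1), the intended value per the docstring. — e.g. on diff_idx(-4, -2): A returns 0, B returns 1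
import Mathlib
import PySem

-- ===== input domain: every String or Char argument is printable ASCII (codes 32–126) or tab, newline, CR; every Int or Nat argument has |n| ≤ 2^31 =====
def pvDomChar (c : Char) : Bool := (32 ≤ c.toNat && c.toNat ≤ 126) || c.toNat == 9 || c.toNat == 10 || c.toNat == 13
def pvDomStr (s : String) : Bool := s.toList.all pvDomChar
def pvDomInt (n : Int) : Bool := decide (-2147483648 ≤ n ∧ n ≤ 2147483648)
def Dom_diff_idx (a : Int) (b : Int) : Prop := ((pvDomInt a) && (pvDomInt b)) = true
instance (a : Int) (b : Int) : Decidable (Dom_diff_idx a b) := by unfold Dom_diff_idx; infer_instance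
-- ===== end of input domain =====

-- B replaces A's per-bit scanning loop by the closed-form ((a^b) & -(a^b)).bit_length() - 1
-- (objective: simpler — no loop at all); on pairs where A's 'a > 0 or b > 0' guard stops
-- the scan before the first differing bit (only possible with a negative argument), B returns
-- the true lowest differing-bit index — see D_diff_idx below.

-- ===== PORT A =====
-- 'a & 1' is ported as floor-mod 2 and 'a >> 1' as floor division by 2 (exact for every int).
def diffIdxLoop (a b idx : Int) : Int :=
  if h : 0 < a ∨ 0 < b then
    if PySem.Int.mod a 2 ≠ PySem.Int.mod b 2 then idx
    else diffIdxLoop (PySem.Int.floordiv a 2) (PySem.Int.floordiv b 2) (idx + 1)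
  else idx
termination_by a.toNat + b.toNat
decreasing_by
  rw [PySem.Int.floordiv_eq_ediv_of_pos (by omega), PySem.Int.floordiv_eq_ediv_of_pos (by omega)]
  omega

def diff_idx (a : Int) (b : Int) : Int :=
  if a = b then -1 else diffIdxLoop a b 0

-- ===== PORT B =====
-- '^', '&' are PySem.Int.bxor/band and '.bit_length()' is PySem.Int.bitLength (Python-exact on negatives).
def diff_idx_alt (a : Int) (b : Int) : Int :=
  let x := PySem.Int.bxor a b
  if x = 0 then -1
  else (PySem.Int.bitLength (PySem.Int.band x (-x)) : Int) - 1

-- ===== PRECONDITION & SPEC =====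
-- number of iterations A's guard 'a > 0 or b > 0' allows before both arguments are shifted to ≤ 0
def pvPosBits (x : Int) : Nat := if 0 < x then PySem.Int.bitLength x else 0

-- On pairs a ≠ b whose bits agree through max(bit_length(max(a,0)), bit_length(max(b,0)))
-- (possible only when a or b is negative), A's guard stops the scan early and A returns the
-- stale counter, while B returns the true lowest differing-bit index, the intended value.
def D_diff_idx (a : Int) (b : Int) : Prop :=
  a ≠ b ∧ (a - b) % (2 : Int) ^ (max (pvPosBits a) (pvPosBits b) + 1) = 0
instance (a : Int) (b : Int) : Decidable (D_diff_idx a b) := by unfold D_diff_idx; infer_instance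

def Spec_diff_idx (a : Int) (b : Int) (out : Int) : Prop := ¬ D_diff_idx a b → out = diff_idx_alt a b
instance (a : Int) (b : Int) (out : Int) : Decidable (Spec_diff_idx a b out) := by unfold Spec_diff_idx; infer_instance

def pvDiffWitness_diff_idx : Int × Int := (-4, -2)
def pvDiffWitnessOut_diff_idx : Int × Int := (0, 1)

-- ===== CLAIM (what is proved, stated in full; the proofs are below) =====
def Claim_unchanged_diff_idx : Prop := ∀ (a : Int) (b : Int), Dom_diff_idx a b → Spec_diff_idx a b (diff_idx a b)
def Claim_changed_diff_idx : Prop := Dom_diff_idx (pvDiffWitness_diff_idx.1) (pvDiffWitness_diff_idx.2) ∧ D_diff_idx (pvDiffWitness_diff_idx.1) (pvDiffWitness_diff_idx.2) ∧ diff_idx (pvDiffWitness_diff_idx.1) (pvDiffWitness_diff_idx.2) = pvDiffWitnessOut_diff_idx.1 ∧ diff_idx_alt (pvDiffWitness_diff_idx.1) (pvDiffWitness_diff_idx.2) = pvDiffWitnessOut_diff_idx.2 ∧ pvDiffWitnessOut_diff_idx.1 ≠ pvDiffWitnessOut_diff_idx.2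
def Claim_exact_diff_idx : Prop := ∀ (a : Int) (b : Int), Dom_diff_idx a b → D_diff_idx a b → diff_idx a b ≠ diff_idx_alt a b

-- ===== LEMMAS AND PROOFS =====

/-- `n - (n &&& (n - 1))` : the value Python's `x & -x` isolates, on the natAbs. -/
def pvLsbN (n : Nat) : Nat := n - (n &&& (n - 1))

theorem pv_odd_and (n : Nat) (h : n % 2 = 1) : n &&& (n - 1) = n - 1 := by
  apply Nat.eq_of_testBit_eq
  intro i
  cases i with
  | zero =>
      simp only [Nat.testBit_zero]
      have h0 : (n - 1) % 2 = 0 := by omega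
      simp [h0]
  | succ i =>
      rw [Nat.testBit_succ, Nat.testBit_succ, Nat.and_div_two]
      have h2 : (n - 1) / 2 = n / 2 := by omega
      rw [h2, Nat.and_self]

theorem pv_even_and (n : Nat) (h : n % 2 = 0) (_hn : n ≠ 0) :
    n &&& (n - 1) = 2 * ((n / 2) &&& (n / 2 - 1)) := by
  apply Nat.eq_of_testBit_eq
  intro i
  cases i with
  | zero =>
      simp only [Nat.testBit_zero]
      have h0 : (2 * (n / 2 &&& (n / 2 - 1))) % 2 = 0 := by omega
      simp [h, h0]
  | succ i =>
      rw [Nat.testBit_succ, Nat.testBit_succ, Nat.and_div_two]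
      have h2 : (n - 1) / 2 = n / 2 - 1 := by omega
      have h3 : (2 * (n / 2 &&& (n / 2 - 1))) / 2 = n / 2 &&& (n / 2 - 1) := by omega
      rw [h2, h3]

theorem pv_lsb_odd (n : Nat) (h : n % 2 = 1) : pvLsbN n = 1 := by
  unfold pvLsbN
  rw [pv_odd_and n h]
  omega

theorem pv_lsb_even (n : Nat) (h : n % 2 = 0) (hn : n ≠ 0) :
    pvLsbN n = 2 * pvLsbN (n / 2) := by
  unfold pvLsbN
  rw [pv_even_and n h hn]
  have h1 : n / 2 &&& (n / 2 - 1) ≤ n / 2 := Nat.and_le_left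
  omega

theorem pv_lsb_pos : ∀ n : Nat, n ≠ 0 → 0 < pvLsbN n := by
  intro n
  induction n using Nat.strong_induction_on with
  | _ n ih =>
      intro hn
      rcases Nat.mod_two_eq_zero_or_one n with h | h
      · rw [pv_lsb_even n h hn]
        have := ih (n / 2) (by omega) (by omega)
        omega
      · rw [pv_lsb_odd n h]
        omega

theorem pv_band_neg (x : Int) (hx : x ≠ 0) :
    PySem.Int.band x (-x) = ((pvLsbN x.natAbs : Nat) : Int) := by
  rcases lt_or_gt_of_ne hx with hneg | hpos
  · rw [PySem.Int.band.eq_1]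
    rw [if_neg (by omega), if_pos (by omega)]
    have h1 : (-x - 1).toNat = (-x).toNat - 1 := by omega
    have h2 : (-x).toNat = x.natAbs := by omega
    rw [h1, h2]
    rfl
  · rw [PySem.Int.band.eq_1]
    rw [if_pos (by omega), if_neg (by omega)]
    have h1 : (-(-x) - 1).toNat = x.toNat - 1 := by omega
    have h2 : x.toNat = x.natAbs := by omega
    rw [h1, h2]
    rfl

-- two's-complement representation lemmas for bxor
theorem pv_bxor_nn (m n : Nat) : PySem.Int.bxor ((m : Int)) (-(n : Int) - 1) = -((m ^^^ n : Nat) : Int) - 1 := by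
  rw [PySem.Int.bxor.eq_1]
  rw [if_pos (by omega), if_neg (by omega)]
  have h1 : ((m : Int)).toNat = m := by omega
  have h2 : (-(-(n : Int) - 1) - 1).toNat = n := by omega
  rw [h1, h2]

theorem pv_bxor_negneg (m n : Nat) :
    PySem.Int.bxor (-(m : Int) - 1) (-(n : Int) - 1) = ((m ^^^ n : Nat) : Int) := by
  rw [PySem.Int.bxor.eq_1]
  rw [if_neg (by omega), if_neg (by omega)]
  have h1 : (-(-(m : Int) - 1) - 1).toNat = m := by omega
  have h2 : (-(-(n : Int) - 1) - 1).toNat = n := by omega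
  rw [h1, h2]

theorem pv_fd_neg (n : Nat) : PySem.Int.floordiv (-(n : Int) - 1) 2 = -((n / 2 : Nat) : Int) - 1 := by
  rw [PySem.Int.floordiv_eq_iff_of_pos (by omega)]
  constructor <;> [skip; skip] <;> omega

theorem pv_mod_neg (n : Nat) : PySem.Int.mod (-(n : Int) - 1) 2 = 1 - ((n % 2 : Nat) : Int) := by
  rw [PySem.Int.mod_eq_emod_of_pos (by omega)]
  omega


theorem pv_mod_cast (m : Nat) : PySem.Int.mod ((m : Nat) : Int) 2 = ((m % 2 : Nat) : Int) := by
  exact_mod_cast PySem.Int.mod_natCast m 2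

theorem pv_fd_cast (m : Nat) : PySem.Int.floordiv ((m : Nat) : Int) 2 = ((m / 2 : Nat) : Int) := by
  exact_mod_cast PySem.Int.floordiv_natCast m 2

-- X1 : a ^ b == 0 iff a == b
theorem pv_bxor_eq_zero (a b : Int) : PySem.Int.bxor a b = 0 ↔ a = b := by
  by_cases ha : 0 ≤ a <;> by_cases hb : 0 ≤ b
  · rw [PySem.Int.bxor_of_nonneg ha hb]
    rw [Int.natCast_eq_zero, Nat.xor_eq_zero_iff]
    omega
  · have hb' : b = -((-b - 1).toNat : Int) - 1 := by omega
    have ha' : a = ((a.toNat : Nat) : Int) := by omega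
    rw [ha', hb', pv_bxor_nn]
    constructor
    · intro h; exfalso; omega
    · intro h; exfalso; omega
  · have ha' : a = -((-a - 1).toNat : Int) - 1 := by omega
    have hb' : b = ((b.toNat : Nat) : Int) := by omega
    rw [ha', hb', PySem.Int.bxor_comm, pv_bxor_nn]
    constructor
    · intro h; exfalso; omega
    · intro h; exfalso; omega
  · have ha' : a = -((-a - 1).toNat : Int) - 1 := by omega
    have hb' : b = -((-b - 1).toNat : Int) - 1 := by omega
    rw [ha', hb', pv_bxor_negneg]
    rw [Int.natCast_eq_zero, Nat.xor_eq_zero_iff]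
    omega

-- X2 : parity of a ^ b is the parity of a + b
theorem pv_bxor_parity (a b : Int) :
    PySem.Int.mod (PySem.Int.bxor a b) 2 = 0 ↔ PySem.Int.mod a 2 = PySem.Int.mod b 2 := by
  have key : ∀ m n : Nat, ((m ^^^ n) % 2 : Nat) = (m + n) % 2 := fun m n => Nat.xor_mod_two_eq
  by_cases ha : 0 ≤ a <;> by_cases hb : 0 ≤ b
  · have ha' : a = ((a.toNat : Nat) : Int) := by omega
    have hb' : b = ((b.toNat : Nat) : Int) := by omega
    rw [ha', hb', PySem.Int.bxor_of_nonneg (by omega) (by omega)]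
    have h1 : ((a.toNat : Int)).toNat = a.toNat := by omega
    have h2 : ((b.toNat : Int)).toNat = b.toNat := by omega
    rw [h1, h2]
    rw [pv_mod_cast, pv_mod_cast, pv_mod_cast, key]
    constructor <;> intro h <;> omega
  · have ha' : a = ((a.toNat : Nat) : Int) := by omega
    have hb' : b = -((-b - 1).toNat : Int) - 1 := by omega
    rw [ha', hb', pv_bxor_nn, pv_mod_neg, pv_mod_cast, pv_mod_neg, key]
    constructor <;> intro h <;> omega
  · have ha' : a = -((-a - 1).toNat : Int) - 1 := by omega
    have hb' : b = ((b.toNat : Nat) : Int) := by omega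
    rw [ha', hb', PySem.Int.bxor_comm, pv_bxor_nn, pv_mod_neg, pv_mod_cast, pv_mod_neg, key]
    constructor <;> intro h <;> omega
  · have ha' : a = -((-a - 1).toNat : Int) - 1 := by omega
    have hb' : b = -((-b - 1).toNat : Int) - 1 := by omega
    rw [ha', hb', pv_bxor_negneg, pv_mod_cast, pv_mod_neg, pv_mod_neg, key]
    constructor <;> intro h <;> omega

-- X3 : (a ^ b) >> 1 = (a >> 1) ^ (b >> 1)
theorem pv_bxor_shift (a b : Int) :
    PySem.Int.floordiv (PySem.Int.bxor a b) 2 =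
      PySem.Int.bxor (PySem.Int.floordiv a 2) (PySem.Int.floordiv b 2) := by
  by_cases ha : 0 ≤ a <;> by_cases hb : 0 ≤ b
  · have ha' : a = ((a.toNat : Nat) : Int) := by omega
    have hb' : b = ((b.toNat : Nat) : Int) := by omega
    rw [ha', hb', PySem.Int.bxor_of_nonneg (by omega) (by omega)]
    have h1 : ((a.toNat : Int)).toNat = a.toNat := by omega
    have h2 : ((b.toNat : Int)).toNat = b.toNat := by omega
    rw [h1, h2]
    rw [pv_fd_cast, pv_fd_cast, pv_fd_cast]
    rw [PySem.Int.bxor_of_nonneg (by omega) (by omega)]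
    have h3 : (((a.toNat / 2 : Nat) : Int)).toNat = a.toNat / 2 := by omega
    have h4 : (((b.toNat / 2 : Nat) : Int)).toNat = b.toNat / 2 := by omega
    rw [h3, h4, Nat.xor_div_two]
  · have ha' : a = ((a.toNat : Nat) : Int) := by omega
    have hb' : b = -((-b - 1).toNat : Int) - 1 := by omega
    rw [ha', hb', pv_bxor_nn, pv_fd_neg, pv_fd_cast, pv_fd_neg, pv_bxor_nn,
      Nat.xor_div_two]
  · have ha' : a = -((-a - 1).toNat : Int) - 1 := by omega
    have hb' : b = ((b.toNat : Nat) : Int) := by omega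
    rw [ha', hb', PySem.Int.bxor_comm, pv_bxor_nn, pv_fd_neg, pv_fd_neg, pv_fd_cast,
      PySem.Int.bxor_comm, pv_bxor_nn, Nat.xor_div_two]
  · have ha' : a = -((-a - 1).toNat : Int) - 1 := by omega
    have hb' : b = -((-b - 1).toNat : Int) - 1 := by omega
    rw [ha', hb', pv_bxor_negneg, pv_fd_neg, pv_fd_neg, pv_bxor_negneg, pv_fd_cast,
      Nat.xor_div_two]

/-- B's core value on a nonzero xor. -/
theorem pv_bitLength_one : PySem.Int.bitLength ((1 : Nat) : Int) = 1 := by decide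

theorem pv_bitLength_double (l : Nat) (hl : 0 < l) :
    PySem.Int.bitLength ((2 * l : Nat) : Int) = PySem.Int.bitLength ((l : Nat) : Int) + 1 := by
  have h := PySem.Int.bitLength_natCast (m := 2 * l) (by omega)
  have h2 : (2 * l) / 2 = l := by omega
  rw [h, h2]

theorem pv_bitLength_cast_pos (l : Nat) (hl : 0 < l) : 1 ≤ PySem.Int.bitLength ((l : Nat) : Int) := by
  rw [PySem.Int.bitLength_natCast (by omega)]
  omega

/-- abbreviation for B's branch value -/
def pvG (x : Int) : Int := (PySem.Int.bitLength (PySem.Int.band x (-x)) : Int) - 1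

theorem pv_g_odd (x : Int) (h : PySem.Int.mod x 2 = 1) : pvG x = 0 := by
  have hx : x ≠ 0 := by
    intro h0
    rw [h0] at h
    rw [PySem.Int.mod_eq_emod_of_pos (by omega)] at h
    omega
  have hodd : x.natAbs % 2 = 1 := by
    rw [PySem.Int.mod_eq_emod_of_pos (by omega)] at h
    omega
  unfold pvG
  rw [pv_band_neg x hx, pv_lsb_odd _ hodd, pv_bitLength_one]
  norm_num

theorem pv_nediv (a b : Int) (hp : PySem.Int.mod a 2 = PySem.Int.mod b 2) (hne : a ≠ b) :
    PySem.Int.floordiv a 2 ≠ PySem.Int.floordiv b 2 := by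
  have h1 := PySem.Int.floordiv_mul_add_mod a 2
  have h2 := PySem.Int.floordiv_mul_add_mod b 2
  intro h
  apply hne
  omega

theorem pv_g_even_step (a b : Int) (hp : PySem.Int.mod a 2 = PySem.Int.mod b 2) (hne : a ≠ b) :
    pvG (PySem.Int.bxor a b) =
      pvG (PySem.Int.bxor (PySem.Int.floordiv a 2) (PySem.Int.floordiv b 2)) + 1 := by
  set x := PySem.Int.bxor a b with hxdef
  have hx0 : x ≠ 0 := by
    rw [hxdef, Ne, pv_bxor_eq_zero]; exact hne
  have heven : PySem.Int.mod x 2 = 0 := (pv_bxor_parity a b).mpr hp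
  have hnateven : x.natAbs % 2 = 0 := by
    rw [PySem.Int.mod_eq_emod_of_pos (by omega)] at heven
    omega
  have hx' : PySem.Int.bxor (PySem.Int.floordiv a 2) (PySem.Int.floordiv b 2) =
      PySem.Int.floordiv x 2 := (pv_bxor_shift a b).symm
  have hxne' : PySem.Int.floordiv x 2 ≠ 0 := by
    rw [← hx']
    rw [Ne, pv_bxor_eq_zero]
    exact pv_nediv a b hp hne
  have habs : (PySem.Int.floordiv x 2).natAbs = x.natAbs / 2 := by
    rw [PySem.Int.floordiv_eq_ediv_of_pos (by omega)]
    omega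
  unfold pvG
  rw [pv_band_neg x hx0, hx', pv_band_neg _ hxne', habs]
  rw [pv_lsb_even _ hnateven (by omega)]
  have hpos : 0 < pvLsbN (x.natAbs / 2) := pv_lsb_pos _ (by omega)
  rw [pv_bitLength_double _ hpos]
  push_cast
  ring

theorem pv_g_nonneg (x : Int) (hx : x ≠ 0) : 0 ≤ pvG x := by
  unfold pvG
  rw [pv_band_neg x hx]
  have := pv_bitLength_cast_pos (pvLsbN x.natAbs) (pv_lsb_pos _ (by omega))
  omega

-- pvPosBits halving under the loop guard
theorem pv_posBits_step (x : Int) : pvPosBits x = pvPosBits (PySem.Int.floordiv x 2) + (if 0 < x then 1 else 0) := by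
  unfold pvPosBits
  by_cases hx : 0 < x
  · rw [if_pos hx, if_pos hx]
    rw [PySem.Int.bitLength_of_pos hx]
    by_cases hx' : 0 < PySem.Int.floordiv x 2
    · rw [if_pos hx']
    · rw [if_neg hx']
      have hnn : 0 ≤ PySem.Int.floordiv x 2 := by
        rw [PySem.Int.floordiv_eq_ediv_of_pos (by omega)]
        omega
      have hz : PySem.Int.floordiv x 2 = 0 := by omega
      rw [hz, PySem.Int.bitLength_zero]
  · rw [if_neg hx, if_neg hx]
    have : ¬ 0 < PySem.Int.floordiv x 2 := by
      rw [PySem.Int.floordiv_eq_ediv_of_pos (by omega)]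
      omega
    rw [if_neg this]

theorem pv_posBits_zero (x : Int) (hx : ¬ 0 < x) : pvPosBits x = 0 := by
  unfold pvPosBits
  rw [if_neg hx]

theorem pv_posBits_fd_zero (x : Int) (hx : ¬ 0 < x) : pvPosBits (PySem.Int.floordiv x 2) = 0 := by
  apply pv_posBits_zero
  rw [PySem.Int.floordiv_eq_ediv_of_pos (by omega)]
  omega

theorem pv_t_step (a b : Int) (h : 0 < a ∨ 0 < b) :
    max (pvPosBits a) (pvPosBits b) =
      max (pvPosBits (PySem.Int.floordiv a 2)) (pvPosBits (PySem.Int.floordiv b 2)) + 1 := by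
  have ha := pv_posBits_step a
  have hb := pv_posBits_step b
  by_cases h1 : 0 < a <;> by_cases h2 : 0 < b
  · rw [if_pos h1] at ha
    rw [if_pos h2] at hb
    omega
  · rw [if_pos h1] at ha
    have e1 := pv_posBits_zero b h2
    have e2 := pv_posBits_fd_zero b h2
    omega
  · rw [if_pos h2] at hb
    have e1 := pv_posBits_zero a h1
    have e2 := pv_posBits_fd_zero a h1
    omega
  · exact absurd h (by tauto)

theorem pv_ab2 (a b : Int) (hp : PySem.Int.mod a 2 = PySem.Int.mod b 2) :
    a - b = 2 * (PySem.Int.floordiv a 2 - PySem.Int.floordiv b 2) := by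
  have h1 := PySem.Int.floordiv_mul_add_mod a 2
  have h2 := PySem.Int.floordiv_mul_add_mod b 2
  omega

-- D transfer along one loop step (both directions)
theorem pv_D_up (a b : Int) (hg : 0 < a ∨ 0 < b) (hp : PySem.Int.mod a 2 = PySem.Int.mod b 2)
    (hne : a ≠ b) (hD : D_diff_idx (PySem.Int.floordiv a 2) (PySem.Int.floordiv b 2)) :
    D_diff_idx a b := by
  obtain ⟨-, hdvd⟩ := hD
  refine ⟨hne, ?_⟩
  obtain ⟨c, hc⟩ := Int.dvd_of_emod_eq_zero hdvd
  apply Int.emod_eq_zero_of_dvd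
  rw [pv_t_step a b hg]
  refine ⟨c, ?_⟩
  rw [pv_ab2 a b hp, hc, pow_succ]
  ring

theorem pv_D_down (a b : Int) (hg : 0 < a ∨ 0 < b) (hp : PySem.Int.mod a 2 = PySem.Int.mod b 2)
    (hD : D_diff_idx a b) :
    D_diff_idx (PySem.Int.floordiv a 2) (PySem.Int.floordiv b 2) := by
  obtain ⟨hne, hdvd⟩ := hD
  refine ⟨pv_nediv a b hp hne, ?_⟩
  rw [pv_t_step a b hg] at hdvd
  obtain ⟨c, hc⟩ := Int.dvd_of_emod_eq_zero hdvd
  apply Int.emod_eq_zero_of_dvd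
  refine ⟨c, ?_⟩
  rw [pv_ab2 a b hp, pow_succ] at hc
  have h2 : (2 : Int) * (PySem.Int.floordiv a 2 - PySem.Int.floordiv b 2) =
      2 * (2 ^ (max (pvPosBits (PySem.Int.floordiv a 2)) (pvPosBits (PySem.Int.floordiv b 2)) + 1) * c) := by
    linear_combination hc
  exact mul_left_cancel₀ (by norm_num) h2

theorem pv_parity_of_D (a b : Int) (hD : D_diff_idx a b) :
    PySem.Int.mod a 2 = PySem.Int.mod b 2 := by
  obtain ⟨-, hdvd⟩ := hD
  have h2 : (2 : Int) ∣ a - b :=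
    dvd_trans (dvd_pow_self 2 (Nat.succ_ne_zero _)) (Int.dvd_of_emod_eq_zero hdvd)
  rw [PySem.Int.mod_eq_emod_of_pos (by omega), PySem.Int.mod_eq_emod_of_pos (by omega)]
  omega

theorem pv_guardfalse_parity (a b : Int) (hg : ¬ (0 < a ∨ 0 < b)) (hne : a ≠ b)
    (hD : ¬ D_diff_idx a b) : PySem.Int.mod a 2 ≠ PySem.Int.mod b 2 := by
  intro heq
  apply hD
  refine ⟨hne, ?_⟩
  rw [pv_posBits_zero a (by omega), pv_posBits_zero b (by omega)]
  have h2 : (2 : Int) ∣ a - b := by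
    have h1 := PySem.Int.floordiv_mul_add_mod a 2
    have h2 := PySem.Int.floordiv_mul_add_mod b 2
    exact ⟨PySem.Int.floordiv a 2 - PySem.Int.floordiv b 2, by omega⟩
  obtain ⟨c, hc⟩ := h2
  apply Int.emod_eq_zero_of_dvd
  simpa using ⟨c, hc⟩

theorem pv_mod_bxor_one (a b : Int) (hpar : PySem.Int.mod a 2 ≠ PySem.Int.mod b 2) :
    PySem.Int.mod (PySem.Int.bxor a b) 2 = 1 := by
  have h2 := pv_bxor_parity a b
  have hne0 : PySem.Int.mod (PySem.Int.bxor a b) 2 ≠ 0 := fun h => hpar (h2.mp h)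
  have hnn := PySem.Int.mod_nonneg (a := PySem.Int.bxor a b) (b := 2) (by omega)
  have hlt := PySem.Int.mod_lt (a := PySem.Int.bxor a b) (b := 2) (by omega)
  omega

theorem pv_guard_false_case (a b idx : Int) (hg : ¬ (0 < a ∨ 0 < b)) (hne : a ≠ b)
    (hD : ¬ D_diff_idx a b) : diffIdxLoop a b idx = idx + pvG (PySem.Int.bxor a b) := by
  rw [diffIdxLoop, dif_neg hg]
  have hpar := pv_guardfalse_parity a b hg hne hD
  rw [pv_g_odd _ (pv_mod_bxor_one a b hpar)]
  ring

theorem pv_fd_toNat_sum (a b : Int) (hg : 0 < a ∨ 0 < b) :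
    (PySem.Int.floordiv a 2).toNat + (PySem.Int.floordiv b 2).toNat < a.toNat + b.toNat := by
  rw [PySem.Int.floordiv_eq_ediv_of_pos (by omega), PySem.Int.floordiv_eq_ediv_of_pos (by omega)]
  omega

theorem pv_main_eq : ∀ (N : Nat) (a b idx : Int), a.toNat + b.toNat ≤ N → a ≠ b →
    ¬ D_diff_idx a b → diffIdxLoop a b idx = idx + pvG (PySem.Int.bxor a b) := by
  intro N
  induction N with
  | zero =>
      intro a b idx hN hne hD
      exact pv_guard_false_case a b idx (by omega) hne hD
  | succ N ih =>
      intro a b idx hN hne hD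
      by_cases hg : 0 < a ∨ 0 < b
      · rw [diffIdxLoop, dif_pos hg]
        by_cases hpar : PySem.Int.mod a 2 ≠ PySem.Int.mod b 2
        · rw [if_pos hpar, pv_g_odd _ (pv_mod_bxor_one a b hpar)]
          ring
        · push_neg at hpar
          rw [if_neg (fun h => h hpar)]
          have hsum := pv_fd_toNat_sum a b hg
          have hne' := pv_nediv a b hpar hne
          have hD' : ¬ D_diff_idx (PySem.Int.floordiv a 2) (PySem.Int.floordiv b 2) :=
            fun h => hD (pv_D_up a b hg hpar hne h)
          rw [ih _ _ _ (by omega) hne' hD', pv_g_even_step a b hpar hne]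
          ring
      · exact pv_guard_false_case a b idx hg hne hD

theorem pv_main_t : ∀ (N : Nat) (a b idx : Int), a.toNat + b.toNat ≤ N → D_diff_idx a b →
    diffIdxLoop a b idx = idx + ((max (pvPosBits a) (pvPosBits b) : Nat) : Int) ∧
      ((max (pvPosBits a) (pvPosBits b) : Nat) : Int) < pvG (PySem.Int.bxor a b) := by
  intro N
  induction N with
  | zero =>
      intro a b idx hN hD
      have hg : ¬ (0 < a ∨ 0 < b) := by omega
      have hne : a ≠ b := hD.1
      have hpar := pv_parity_of_D a b hD
      have ht0 : max (pvPosBits a) (pvPosBits b) = 0 := by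
        rw [pv_posBits_zero a (by omega), pv_posBits_zero b (by omega)]
        omega
      constructor
      · rw [diffIdxLoop, dif_neg hg, ht0]
        norm_num
      · rw [ht0]
        have hstep := pv_g_even_step a b hpar hne
        have hxne' : PySem.Int.bxor (PySem.Int.floordiv a 2) (PySem.Int.floordiv b 2) ≠ 0 := by
          rw [Ne, pv_bxor_eq_zero]
          exact pv_nediv a b hpar hne
        have hnn := pv_g_nonneg _ hxne'
        push_cast
        omega
  | succ N ih =>
      intro a b idx hN hD
      have hne : a ≠ b := hD.1
      have hpar := pv_parity_of_D a b hD
      by_cases hg : 0 < a ∨ 0 < b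
      · have hD' := pv_D_down a b hg hpar hD
        have hsum := pv_fd_toNat_sum a b hg
        have hih := ih (PySem.Int.floordiv a 2) (PySem.Int.floordiv b 2) (idx + 1) (by omega) hD'
        have hts := pv_t_step a b hg
        have hstep := pv_g_even_step a b hpar hne
        constructor
        · rw [diffIdxLoop, dif_pos hg, if_neg (fun h => h hpar), hih.1, hts]
          push_cast
          ring
        · rw [hts, hstep]
          have := hih.2
          push_cast
          omega
      · have ht0 : max (pvPosBits a) (pvPosBits b) = 0 := by
          rw [pv_posBits_zero a (by omega), pv_posBits_zero b (by omega)]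
          omega
        constructor
        · rw [diffIdxLoop, dif_neg hg, ht0]
          norm_num
        · rw [ht0]
          have hstep := pv_g_even_step a b hpar hne
          have hxne' : PySem.Int.bxor (PySem.Int.floordiv a 2) (PySem.Int.floordiv b 2) ≠ 0 := by
            rw [Ne, pv_bxor_eq_zero]
            exact pv_nediv a b hpar hne
          have hnn := pv_g_nonneg _ hxne'
          push_cast
          omega

-- ===== VERDICT (by name: the statement is the Claim_ definition above) =====
theorem diff_idx_spec : Claim_unchanged_diff_idx := by
  intro a b _ hD
  by_cases hab : a = b
  · subst hab
    rw [diff_idx, if_pos rfl, diff_idx_alt]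
    simp [PySem.Int.bxor_self]
  · rw [diff_idx, if_neg hab, diff_idx_alt]
    have hx : PySem.Int.bxor a b ≠ 0 := by rw [Ne, pv_bxor_eq_zero]; exact hab
    simp only [if_neg hx]
    have := pv_main_eq (a.toNat + b.toNat) a b 0 (le_refl _) hab hD
    rw [this]
    unfold pvG
    ring

theorem diff_idx_changed : Claim_changed_diff_idx := by
  unfold Claim_changed_diff_idx
  refine ⟨by decide, by decide, ?_, by decide, by decide⟩
  show diff_idx (-4) (-2) = 0
  rw [diff_idx, if_neg (by decide), diffIdxLoop, dif_neg (by decide)]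

theorem diff_idx_tight : Claim_exact_diff_idx := by
  intro a b _ hD
  have hab : a ≠ b := hD.1
  rw [diff_idx, if_neg hab, diff_idx_alt]
  have hx : PySem.Int.bxor a b ≠ 0 := by rw [Ne, pv_bxor_eq_zero]; exact hab
  simp only [if_neg hx]
  have h := pv_main_t (a.toNat + b.toNat) a b 0 (le_refl _) hD
  rw [h.1]
  have h2 := h.2
  unfold pvG at h2
  omega
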